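-- pv_equiv track=rewrite | github.com/Grohis/Project_Perfomance_Lab | task1/task1.py | circular_path
-- ===== SOURCE A (Python) =====
-- def circular_path(n, m):
--     """Traversing an array of numbers in a circle with a given step"""
--
--     buffer = list(range(1, n + 1))
--     index = 0
--     path = []
--
--     while len(path) < n:
--         path.append(buffer[index])
--         index = (index + m - 1) % n
--     return path
-- ===== SOURCE B (Python) =====
-- def circular_path(n, m):
--     """Traversing an array of numbers in a circle with a given step"""
--     return [(k * (m - 1)) % n + 1 for k in range(n)]
-- ===== Notes on version B (the rewrite author's own statement) =====
-- stated objective: simpler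
-- what changed: Replaces the stateful while loop that simulates stepping through a prebuilt buffer with a one-line closed form: the position after k steps is k*(m-1) mod n, so each value is (k*(m-1)) % n + 1 for k in range(n).
import Mathlib
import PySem

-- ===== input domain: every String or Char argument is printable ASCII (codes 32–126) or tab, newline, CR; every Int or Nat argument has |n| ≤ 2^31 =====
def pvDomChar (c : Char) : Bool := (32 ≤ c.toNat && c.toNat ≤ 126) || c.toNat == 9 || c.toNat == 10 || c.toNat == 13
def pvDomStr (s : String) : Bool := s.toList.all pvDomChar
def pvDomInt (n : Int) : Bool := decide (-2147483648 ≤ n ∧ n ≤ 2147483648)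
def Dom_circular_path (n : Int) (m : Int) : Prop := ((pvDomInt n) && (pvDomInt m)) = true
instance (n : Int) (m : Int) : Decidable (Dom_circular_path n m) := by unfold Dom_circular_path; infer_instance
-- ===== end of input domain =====

-- B replaces A's stateful stepping loop with the closed form (k*(m-1)) % n + 1 for k in range(n).

-- ===== PORT A =====
-- the while loop: runs exactly n times (path grows by one each pass); fuel = remaining passes
def circA_loop (buffer : List Int) (n : Int) (m : Int) : Nat → Int → List Int
  | 0, _ => []
  | f + 1, index =>
      PySem.List.pyGetD buffer index 0 ::
        circA_loop buffer n m f (PySem.Int.mod (index + m - 1) n)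

def circular_path (n : Int) (m : Int) : List Int :=
  circA_loop (PySem.List.pyRange 1 (n + 1) 1) n m n.toNat 0

-- ===== PORT B =====
def circular_path_alt (n : Int) (m : Int) : List Int :=
  (PySem.List.pyRange 0 n 1).map (fun k => PySem.Int.mod (k * (m - 1)) n + 1)

-- ===== PRECONDITION & SPEC =====
def Spec_circular_path (n : Int) (m : Int) (out : List Int) : Prop := out = circular_path_alt n m
instance (n : Int) (m : Int) (out : List Int) : Decidable (Spec_circular_path n m out) := by unfold Spec_circular_path; infer_instance

-- ===== CLAIM (what is proved, stated in full; the proofs are below) =====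
def Claim_equal_circular_path : Prop := ∀ (n : Int) (m : Int), Dom_circular_path n m → Spec_circular_path n m (circular_path n m)

-- ===== LEMMAS AND PROOFS =====

-- A's loop with fuel f starting at index i produces the closed-form values i + k*(m-1) mod n.
theorem circA_loop_closed (n m : Int) (hn : 0 < n) (f : Nat) (i : Int)
    (hi0 : 0 ≤ i) (hin : i < n) :
    circA_loop (PySem.List.pyRange 1 (n + 1) 1) n m f i =
      (List.range f).map (fun (k : Nat) => PySem.Int.mod (i + (k : Int) * (m - 1)) n + 1) := by
  induction f generalizing i with
  | zero => simp [circA_loop]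
  | succ f ih =>
      have hlen : (PySem.List.pyRange 1 (n + 1) 1).length = n.toNat := by
        rw [PySem.List.length_pyRange_one]; omega
      have hget : PySem.List.pyGetD (PySem.List.pyRange 1 (n + 1) 1) i 0 = i + 1 := by
        rw [PySem.List.pyGetD_eq_getElem _ _ hi0 (by omega)]
        rw [PySem.List.getElem_pyRange_one]
        omega
      have hmod := PySem.Int.mod_eq_emod_of_pos (a := i + m - 1) hn
      rw [circA_loop, hget,
        ih _ (PySem.Int.mod_nonneg _ hn) (PySem.Int.mod_lt _ hn),
        List.range_succ_eq_map]
      simp only [List.map_cons, List.map_map]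
      refine List.cons_eq_cons.mpr ⟨?_, ?_⟩
      · rw [PySem.Int.mod_eq_emod_of_pos hn]
        rw [Int.emod_eq_of_lt (by omega) (by omega : i + ↑(0:Nat) * (m-1) < n)]
        simp
      apply List.map_congr_left
      intro k _
      simp only [Function.comp]
      rw [PySem.Int.mod_eq_emod_of_pos hn, PySem.Int.mod_eq_emod_of_pos hn]
      congr 1
      conv_lhs => rw [Int.add_emod, Int.emod_emod_of_dvd _ dvd_rfl, ← Int.add_emod]
      rw [PySem.Int.mod_eq_emod_of_pos hn]
      congr 1
      push_cast
      ring

-- ===== VERDICT =====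
theorem circular_path_spec : Claim_equal_circular_path := by
  intro n m _
  unfold Spec_circular_path circular_path circular_path_alt
  by_cases hn : 0 < n
  · rw [circA_loop_closed n m hn n.toNat 0 le_rfl (by omega)]
    rw [PySem.List.pyRange_one 0 n, List.map_map]
    have h0 : (n - 0).toNat = n.toNat := by omega
    rw [h0]
    apply List.map_congr_left
    intro k _
    simp [Function.comp]
  · have h0 : n.toNat = 0 := by omega
    rw [h0]
    simp [circA_loop, PySem.List.pyRange_one_eq_nil (by omega : n ≤ 0)]
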